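-- pv_equiv track=rewrite | github.com/collective/plone.app.locales | utils/utils.py | getProductPath
-- ===== SOURCE A (Python) =====
-- PRODUCTS = {
--     'atct'  : {'name': 'atcontenttypes', 'path': 'ATContentTypes'},
--     'atrbw' : {'name': 'atreferencebrowserwidget', 'path': 'ATReferenceBrowserWidget'},
--     'lp'    : {'name': 'linguaplone', 'path': 'LinguaPlone'},
--     'plone' : {'name': 'plone', 'path': 'CMFPlone'},
--     'plt'   : {'name': 'plonelanguagetool', 'path': 'PloneLanguageTool'},
--     'prt'   : {'name': 'passwordresettool', 'path': 'PasswordResetTool'},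
--     'cmfpw' : {'name': 'cmfplacefulworkflow', 'path': 'CMFPlacefulWorkflow'},
--     'cmfe'  : {'name': 'cmfeditions', 'path': 'CMFEditions'},
--     'kupu'  : {'name': 'kupu/kupu', 'path': 'kupu'},
--     'kupuconfig'  : {'name': 'kupu/kupuconfig', 'path': 'kupu'},
--     'kupupox'  : {'name': 'kupu/kupupox', 'path': 'kupu'},
--     }
--
-- PRODUCTNAMES = [PRODUCTS[abbr]['name'] for abbr in PRODUCTS]
--
-- def getProductPath(product):
--     """ Returns the product path for a known abbreviation."""
--     if product in PRODUCTS.keys():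
--         return PRODUCTS[product]['path']
--     if product in PRODUCTNAMES:
--         for abbr in PRODUCTS.keys():
--             if PRODUCTS[abbr]['name'] == product:
--                 return PRODUCTS[abbr]['path']
--     return product
-- ===== SOURCE B (Python) =====
-- # One flat literal table: every abbreviation and every product name maps
-- # straight to its path; unknown strings fall through unchanged.
-- _PATHS = {
--     'atct': 'ATContentTypes',
--     'atcontenttypes': 'ATContentTypes',
--     'atrbw': 'ATReferenceBrowserWidget',
--     'atreferencebrowserwidget': 'ATReferenceBrowserWidget',
--     'lp': 'LinguaPlone',
--     'linguaplone': 'LinguaPlone',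
--     'plone': 'CMFPlone',
--     'plt': 'PloneLanguageTool',
--     'plonelanguagetool': 'PloneLanguageTool',
--     'prt': 'PasswordResetTool',
--     'passwordresettool': 'PasswordResetTool',
--     'cmfpw': 'CMFPlacefulWorkflow',
--     'cmfplacefulworkflow': 'CMFPlacefulWorkflow',
--     'cmfe': 'CMFEditions',
--     'cmfeditions': 'CMFEditions',
--     'kupu': 'kupu',
--     'kupu/kupu': 'kupu',
--     'kupuconfig': 'kupu',
--     'kupu/kupuconfig': 'kupu',
--     'kupupox': 'kupu',
--     'kupu/kupupox': 'kupu',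
-- }
--
--
-- def getProductPath(product):
--     """ Returns the product path for a known abbreviation."""
--     return _PATHS.get(product, product)
-- ===== Notes on version B (the rewrite author's own statement) =====
-- stated objective: simpler
-- what changed: Replaces the two membership tests plus the inner name-matching scan over the nested PRODUCTS records with one flat literal dict mapping every abbreviation and every product name directly to its path, so the function body is a single defaulted lookup.
import Mathlib
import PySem

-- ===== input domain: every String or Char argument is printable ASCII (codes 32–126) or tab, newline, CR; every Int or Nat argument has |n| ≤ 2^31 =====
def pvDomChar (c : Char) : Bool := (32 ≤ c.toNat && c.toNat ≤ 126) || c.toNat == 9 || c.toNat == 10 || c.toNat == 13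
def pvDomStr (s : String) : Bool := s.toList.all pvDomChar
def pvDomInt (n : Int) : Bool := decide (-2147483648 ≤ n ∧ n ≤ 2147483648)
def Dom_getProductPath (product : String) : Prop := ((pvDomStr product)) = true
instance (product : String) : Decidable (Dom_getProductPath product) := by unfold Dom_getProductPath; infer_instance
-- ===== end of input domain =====

-- B replaces A's two membership tests and the inner name scan over the nested PRODUCTS
-- records by one flat literal abbreviation-and-name → path table with a defaulted
-- lookup (objective: simpler).

-- ===== PORT A =====
-- PRODUCTS as an insertion-ordered list of (abbreviation, name, path)
def pvProducts : List (String × String × String) :=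
  [("atct", "atcontenttypes", "ATContentTypes"),
   ("atrbw", "atreferencebrowserwidget", "ATReferenceBrowserWidget"),
   ("lp", "linguaplone", "LinguaPlone"),
   ("plone", "plone", "CMFPlone"),
   ("plt", "plonelanguagetool", "PloneLanguageTool"),
   ("prt", "passwordresettool", "PasswordResetTool"),
   ("cmfpw", "cmfplacefulworkflow", "CMFPlacefulWorkflow"),
   ("cmfe", "cmfeditions", "CMFEditions"),
   ("kupu", "kupu/kupu", "kupu"),
   ("kupuconfig", "kupu/kupuconfig", "kupu"),
   ("kupupox", "kupu/kupupox", "kupu")]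

-- PRODUCTNAMES = [PRODUCTS[abbr]['name'] for abbr in PRODUCTS]
def pvProductNames : List String := pvProducts.map (fun e => e.2.1)

-- PRODUCTS[product]['path'] : first-match key lookup (only reached when the key is present)
def pvPathLookup (product : String) : List (String × String × String) → String
  | [] => product
  | (abbr, _, path) :: rest => if abbr == product then path else pvPathLookup product rest

-- the inner 'for abbr in PRODUCTS.keys(): if PRODUCTS[abbr]['name'] == product: return path'
-- (falls through to the final 'return product' if no name matches)
def pvNameScan (product : String) : List (String × String × String) → String
  | [] => product
  | (_, name, path) :: rest => if name == product then path else pvNameScan product rest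

def getProductPath (product : String) : String :=
  if (pvProducts.map (fun e => e.1)).contains product then pvPathLookup product pvProducts
  else if pvProductNames.contains product then pvNameScan product pvProducts
  else product

-- ===== PORT B =====
-- _PATHS: one flat literal dict, every abbreviation and every name mapped to its path
def pvFlatPaths : PySem.Dict String String :=
  PySem.Dict.ofList
    [("atct", "ATContentTypes"), ("atcontenttypes", "ATContentTypes"),
     ("atrbw", "ATReferenceBrowserWidget"), ("atreferencebrowserwidget", "ATReferenceBrowserWidget"),
     ("lp", "LinguaPlone"), ("linguaplone", "LinguaPlone"),
     ("plone", "CMFPlone"),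
     ("plt", "PloneLanguageTool"), ("plonelanguagetool", "PloneLanguageTool"),
     ("prt", "PasswordResetTool"), ("passwordresettool", "PasswordResetTool"),
     ("cmfpw", "CMFPlacefulWorkflow"), ("cmfplacefulworkflow", "CMFPlacefulWorkflow"),
     ("cmfe", "CMFEditions"), ("cmfeditions", "CMFEditions"),
     ("kupu", "kupu"), ("kupu/kupu", "kupu"),
     ("kupuconfig", "kupu"), ("kupu/kupuconfig", "kupu"),
     ("kupupox", "kupu"), ("kupu/kupupox", "kupu")]

def getProductPath_alt (product : String) : String := pvFlatPaths.getD product product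

-- ===== PRECONDITION & SPEC =====
def Spec_getProductPath (product : String) (out : String) : Prop := out = getProductPath_alt product
instance (product : String) (out : String) : Decidable (Spec_getProductPath product out) := by unfold Spec_getProductPath; infer_instance

-- ===== CLAIM (what is proved, stated in full; the proofs are below) =====
def Claim_equal_getProductPath : Prop := ∀ (product : String), Dom_getProductPath product → Spec_getProductPath product (getProductPath product)

-- ===== LEMMAS AND PROOFS =====
-- every string that is an abbreviation or a product name
def pvKnown : List String :=
  ["atct", "atrbw", "lp", "plone", "plt", "prt", "cmfpw", "cmfe", "kupu", "kupuconfig", "kupupox",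
   "atcontenttypes", "atreferencebrowserwidget", "linguaplone", "plonelanguagetool",
   "passwordresettool", "cmfplacefulworkflow", "cmfeditions", "kupu/kupu", "kupu/kupuconfig",
   "kupu/kupupox"]

theorem pv_agree (product : String) : getProductPath product = getProductPath_alt product := by
  by_cases h : product ∈ pvKnown
  · simp only [pvKnown, List.mem_cons, List.not_mem_nil, or_false] at h
    rcases h with rfl | rfl | rfl | rfl | rfl | rfl | rfl | rfl | rfl | rfl | rfl | rfl | rfl |
      rfl | rfl | rfl | rfl | rfl | rfl | rfl | rfl <;> decide
  · simp only [pvKnown, List.mem_cons, List.not_mem_nil, or_false, not_or] at h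
    obtain ⟨h1, h2, h3, h4, h5, h6, h7, h8, h9, h10, h11, h12, h13, h14, h15, h16, h17, h18,
      h19, h20, h21⟩ := h
    simp [getProductPath, getProductPath_alt, pvProducts, pvProductNames, pvFlatPaths,
      PySem.Dict.ofList, PySem.Dict.update, List.foldl, PySem.Dict.getD_insert,
      PySem.Dict.getD_empty,
      h1, h2, h3, h4, h5, h6, h7, h8, h9, h10, h11, h12, h13, h14, h15, h16, h17, h18, h19,
      h20, h21]

-- ===== VERDICT (by name: the statement is the Claim_ definition above) =====
theorem getProductPath_spec : Claim_equal_getProductPath := by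
  intro product _
  exact pv_agree product
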